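-- pv_equiv track=rewrite | github.com/ChasePrasad/rle-image-encoder | main.py | count_runs
-- ===== SOURCE A (Python) =====
-- def count_runs(flat_data):
--     count = 0
--     runs = 1
--
--     for i in range(len(flat_data) - 1):
--         if flat_data[i] != flat_data[i + 1]:
--             runs += 1
--             count = 0
--         else:
--             count += 1
--
--         if count == 15:
--             runs += 1
--             count = 0
--
--     return runs
-- ===== SOURCE B (Python) =====
-- def count_runs(flat_data):
--     # Recursive run-splitting: peel the first maximal run (comparing against its
--     # head, not adjacent pairs), count it in closed form as 1 + (L-1)//15, and
--     # recurse on the remainder. Empty input counts as 1 run, as in the encoder.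
--     if not flat_data:
--         return 1
--     head = flat_data[0]
--     j = 1
--     while j < len(flat_data) and flat_data[j] == head:
--         j += 1
--     rest = flat_data[j:]
--     return 1 + (j - 1) // 15 + (count_runs(rest) if rest else 0)
-- ===== Notes on version B (the rewrite author's own statement) =====
-- stated objective: simpler
-- what changed: Replaces A's single-pass adjacent-pair state machine (count/runs counters with reset-at-15) by a recursive run-splitting decomposition: peel the first maximal run comparing elements against the run's head, count it in closed form as 1 + (L-1)//15, and recurse on the remaining suffix.
import Mathlib
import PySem

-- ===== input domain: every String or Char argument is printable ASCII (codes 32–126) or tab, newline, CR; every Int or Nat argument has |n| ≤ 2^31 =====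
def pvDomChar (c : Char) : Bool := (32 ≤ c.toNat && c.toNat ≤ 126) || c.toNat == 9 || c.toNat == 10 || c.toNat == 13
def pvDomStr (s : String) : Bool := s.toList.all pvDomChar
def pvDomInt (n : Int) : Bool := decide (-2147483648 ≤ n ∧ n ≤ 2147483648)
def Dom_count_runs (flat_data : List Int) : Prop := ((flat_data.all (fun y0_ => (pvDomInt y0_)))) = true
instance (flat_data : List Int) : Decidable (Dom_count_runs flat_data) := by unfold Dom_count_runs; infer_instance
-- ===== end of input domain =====

-- B replaces A's adjacent-pair state machine by recursive run-splitting: peel the first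
-- maximal run (compared against its head), count it as 1 + (L-1)//15, recurse; objective: simpler.


-- ===== PORT A =====
def count_runs (flat_data : List Int) : Int :=
  let st :=
    (PySem.List.pyRange 0 ((flat_data.length : Int) - 1) 1).foldl
      (fun (st : Int × Int) i =>
        -- st = (count, runs); the two ifs in the loop body, in order
        let st :=
          if PySem.List.pyGetD flat_data i 0 ≠ PySem.List.pyGetD flat_data (i + 1) 0 then
            (0, st.2 + 1)
          else
            (st.1 + 1, st.2)
        if st.1 = 15 then (0, st.2 + 1) else st)
      (0, 1)
  st.2

-- ===== PORT B =====
-- B's while loop: length of the maximal prefix of xs equal to h (so Python's j = 1 + prefLen)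
def prefLen (h : Int) (xs : List Int) : Nat :=
  match xs with
  | [] => 0
  | y :: ys => if y = h then 1 + prefLen h ys else 0

theorem prefLen_le (h : Int) (xs : List Int) : prefLen h xs ≤ xs.length := by
  induction xs with
  | nil => simp [prefLen]
  | cons y ys ih => rw [prefLen]; split <;> simp <;> omega

def count_runs_alt (flat_data : List Int) : Int :=
  match flat_data with
  | [] => 1
  | x :: xs =>
    -- j = 1 + prefLen x xs; Python's flat_data[j:] with 1 ≤ j ≤ len is exactly List.drop j,
    -- and drop (1 + p) (x :: xs) = drop p xs
    let rest := xs.drop (prefLen x xs)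
    1 + PySem.Int.floordiv (((1 + prefLen x xs : Nat) : Int) - 1) 15 +
      (if rest = [] then 0 else count_runs_alt rest)
termination_by flat_data.length
decreasing_by
  have := prefLen_le x xs
  simp [List.length_drop]

-- ===== PRECONDITION & SPEC =====
def Spec_count_runs (flat_data : List Int) (out : Int) : Prop := out = count_runs_alt flat_data
instance (flat_data : List Int) (out : Int) : Decidable (Spec_count_runs flat_data out) := by unfold Spec_count_runs; infer_instance

-- ===== CLAIM (what is proved, stated in full; the proofs are below) =====
def Claim_equal_count_runs : Prop := ∀ (flat_data : List Int), Dom_count_runs flat_data → Spec_count_runs flat_data (count_runs flat_data)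

-- ===== LEMMAS AND PROOFS =====

-- structural form of A's loop: walk the adjacent pairs carrying st = (count, runs)
def stepPairs : Int → List Int → Int × Int → Int × Int
  | _, [], st => st
  | prev, y :: ys, st =>
    let st := if prev ≠ y then (0, st.2 + 1) else (st.1 + 1, st.2)
    let st := if st.1 = 15 then (0, st.2 + 1) else st
    stepPairs y ys st

-- common ghost specification: cur = current run's value, L = its length so far;
-- specGo cur L xs = total 1 + (runLen - 1)/15 over the remaining runs
def specGo : Int → Int → List Int → Int
  | _, L, [] => 1 + (L - 1) / 15
  | cur, L, y :: ys =>
    if y = cur then specGo cur (L + 1) ys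
    else (1 + (L - 1) / 15) + specGo y 1 ys

-- A's fold over range(len-1) with getD indexing is stepPairs
theorem foldA_eq_stepPairs (xs : List Int) (x : Int) (st : Int × Int) :
    (List.range xs.length).foldl
      (fun (st : Int × Int) k =>
        let st :=
          if (x :: xs).getD k 0 ≠ (x :: xs).getD (k + 1) 0 then (0, st.2 + 1)
          else (st.1 + 1, st.2)
        if st.1 = 15 then (0, st.2 + 1) else st) st
    = stepPairs x xs st := by
  induction xs generalizing x st with
  | nil => simp [stepPairs]
  | cons y ys ih =>
    rw [List.length_cons, List.range_succ_eq_map, List.foldl_cons, List.foldl_map]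
    have h := ih y ((fun (st : Int × Int) =>
        let st := if x ≠ y then (0, st.2 + 1) else (st.1 + 1, st.2)
        if st.1 = 15 then (0, st.2 + 1) else st) st)
    simp only [List.getD_cons_succ, List.getD_cons_zero] at h ⊢
    rw [h]
    rfl

theorem count_runs_cons_eq (x : Int) (xs : List Int) :
    count_runs (x :: xs) = (stepPairs x xs (0, 1)).2 := by
  have hl : ((x :: xs).length : Int) - 1 = ((xs.length : Nat) : Int) := by simp
  rw [count_runs]
  rw [hl, PySem.List.pyRange_zero_natCast, List.foldl_map]
  have hc : List.foldl
      (fun (st : Int × Int) (k : Nat) =>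
        let st :=
          if PySem.List.pyGetD (x :: xs) ((k : Int)) 0 ≠ PySem.List.pyGetD (x :: xs) ((k : Int) + 1) 0
          then (0, st.2 + 1)
          else (st.1 + 1, st.2)
        if st.1 = 15 then (0, st.2 + 1) else st) (0, 1) (List.range xs.length)
      = List.foldl
      (fun (st : Int × Int) (k : Nat) =>
        let st :=
          if (x :: xs).getD k 0 ≠ (x :: xs).getD (k + 1) 0 then (0, st.2 + 1)
          else (st.1 + 1, st.2)
        if st.1 = 15 then (0, st.2 + 1) else st) (0, 1) (List.range xs.length) := by
    apply PySem.List.foldl_congr_mem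
    intro acc k _
    rw [show ((k : Int) + 1) = ((k + 1 : Nat) : Int) by push_cast; ring]
    rw [PySem.List.pyGetD_natCast, PySem.List.pyGetD_natCast]
  rw [hc, foldA_eq_stepPairs]

-- invariant of A's scan against the ghost spec: count = (L-1) % 15, runs = t + 1 + (L-1)/15
theorem stepPairs_eq_specGo (xs : List Int) : ∀ (cur L t : Int), 1 ≤ L →
    (stepPairs cur xs ((L - 1) % 15, t + 1 + (L - 1) / 15)).2 = t + specGo cur L xs := by
  induction xs with
  | nil => intro cur L t hL; simp [stepPairs, specGo]; ring
  | cons y ys ih =>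
    intro cur L t hL
    by_cases hyc : y = cur
    · subst hyc
      have hne : ¬ (y ≠ y) := by simp
      simp only [stepPairs, specGo, if_neg hne]
      by_cases h15 : (L - 1) % 15 + 1 = (15 : Int)
      · rw [if_pos h15]
        have h := ih y (L + 1) t (by omega)
        rw [show (L + 1 - 1) % 15 = (0 : Int) from by omega,
            show t + 1 + (L + 1 - 1) / 15 = t + 1 + (L - 1) / 15 + 1 from by omega] at h
        exact h
      · rw [if_neg h15]
        have h := ih y (L + 1) t (by omega)
        rw [show (L + 1 - 1) % 15 = (L - 1) % 15 + 1 from by omega,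
            show t + 1 + (L + 1 - 1) / 15 = t + 1 + (L - 1) / 15 from by omega] at h
        exact h
    · have hne : cur ≠ y := fun h => hyc (Eq.symm h)
      simp only [stepPairs, specGo, if_pos hne, if_neg hyc]
      rw [if_neg (by norm_num : ¬ ((0 : Int) = 15))]
      have h := ih y 1 (t + 1 + (L - 1) / 15) (by omega)
      norm_num at h
      rw [h]
      ring

-- specGo absorbs the maximal equal prefix in one closed-form step
theorem specGo_unroll (xs : List Int) : ∀ (cur L : Int),
    specGo cur L xs =
      (1 + (L + (prefLen cur xs : Int) - 1) / 15) +
        (match xs.drop (prefLen cur xs) with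
         | [] => 0
         | y :: ys => specGo y 1 ys) := by
  induction xs with
  | nil => intro cur L; simp [specGo, prefLen]
  | cons y ys ih =>
    intro cur L
    by_cases hyc : y = cur
    · subst hyc
      rw [specGo, if_pos rfl, prefLen, if_pos rfl, Nat.add_comm 1 (prefLen y ys),
          List.drop_succ_cons, ih y (L + 1)]
      push_cast
      ring_nf
    · rw [specGo, if_neg hyc, prefLen, if_neg hyc]
      simp

-- B equals the ghost spec
theorem alt_eq_specGo (n : Nat) : ∀ (x : Int) (xs : List Int), xs.length ≤ n →
    count_runs_alt (x :: xs) = specGo x 1 xs := by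
  induction n with
  | zero =>
    intro x xs hn
    have : xs = [] := List.eq_nil_of_length_eq_zero (by omega)
    subst this
    rw [count_runs_alt.eq_def]
    simp [specGo, prefLen, PySem.Int.floordiv]
  | succ m ih =>
    intro x xs hn
    rw [count_runs_alt.eq_def, specGo_unroll xs x 1]
    dsimp only
    rw [PySem.Int.floordiv_eq_ediv_of_pos (by norm_num : (0:Int) < 15)]
    have hp := prefLen_le x xs
    cases hr : xs.drop (prefLen x xs) with
    | nil => simp
    | cons y ys =>
      have hlen : ys.length ≤ m := by
        have := congrArg List.length hr
        simp [List.length_drop] at this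
        omega
      rw [ih y ys hlen]
      simp

-- ===== VERDICT (by name: the statement is the Claim_ definition above) =====
theorem count_runs_spec : Claim_equal_count_runs := by
  intro flat_data _
  unfold Spec_count_runs
  cases flat_data with
  | nil => rw [count_runs_alt.eq_def]; simp [count_runs, PySem.List.pyRange]
  | cons x xs =>
    rw [count_runs_cons_eq, alt_eq_specGo xs.length x xs (le_refl _)]
    have h := stepPairs_eq_specGo xs x 1 0 (by norm_num)
    rw [show ((1 : Int) - 1) % 15 = 0 from by norm_num,
        show (0 : Int) + 1 + (1 - 1) / 15 = 1 from by norm_num] at h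
    rw [h]
    ring
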